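-- pv_equiv track=rewrite | github.com/XCreeperPa/WebCalculator | CalculatorSupportTemp/CalculatorSupportOriginal.py | calc_check
-- ===== SOURCE A (Python) =====
-- def calc_check(obj: str, keys: list):
--     obj = list(obj)  # 将输入的字符串转换为字符列表以便逐个字符处理
--     numbers = '1234567890.'  # 数字的字符集合
--     symbol_set = set(''.join(keys))  # 将操作符列表合并为一个字符集合
--     parentheses = 0  # 用于跟踪括号的数量
--
--     # 遍历输入字符串中的每个字符
--     for t in obj:
--         # 如果字符不在操作符集合或数字字符集合中，返回 False
--         if t not in symbol_set and t not in numbers: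
--             return False
--
--         # 统计左括号的数量
--         if t == '(':
--             parentheses += 1
--
--         # 统计右括号的数量，并检查括号的匹配性
--         if t == ')':
--             parentheses -= 1
--             if parentheses < 0:  # 如果出现多余的右括号，返回 False
--                 return False
--
--     # 如果最终左右括号数量不匹配，返回 False
--     if parentheses != 0:
--         return False
--
--     i = 0
--     while i < len(obj):
--         j = ''
--
--         # 遍历数字字符并将它们组合成一个数字
--         while i < len(obj) and obj[i] in numbers:
--             j += obj[i]
--             i += 1
--
--         # 如果 j 不为空，尝试将其转换为浮点数，如果不能转换则返回 False
--         if j != '':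
--             try:
--                 float(j)
--             except ValueError:
--                 return False
--
--         j = ''
--
--         # 继续遍历非数字字符
--         while i < len(obj) and obj[i] not in numbers:
--             j += obj[i]
--             i += 1
--
--         t = ''
--
--         # 对 j 进行操作符匹配检查
--         while len(j):
--             for k in keys:
--                 if ''.join(j[:len(k)]) == k:
--                     t = k
--
--             # 如果没有找到匹配的操作符，返回 False
--             if t == '':
--                 return False
--
--             j = j[len(t):]  # 从 j 中去除已匹配的操作符
--
--     # 如果通过了所有检查，返回 True，表示输入字符串合法
--     return True
-- ===== SOURCE B (Python) =====
-- def calc_check(obj, keys):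
--     numbers = set('1234567890.')
--     symbols = {c for k in keys for c in k}
--     # 1. every character must be a number char or appear in some operator key
--     if any(c not in numbers and c not in symbols for c in obj):
--         return False
--     # 2. parentheses balanced (never negative, zero at the end)
--     bal = 0
--     for c in obj:
--         bal += (c == '(') - (c == ')')
--         if bal < 0:
--             return False
--     if bal != 0:
--         return False
--     # 3. single index pass over maximal runs: number runs must be a valid float
--     # literal (at most one dot, at least one digit); operator runs must be
--     # decomposable by keys (last matching key wins; the matched length is
--     # carried over to the next position when nothing matches there)
--     i, n = 0, len(obj)
--     while i < n:
--         if obj[i] in numbers: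
--             dots = digits = 0
--             while i < n and obj[i] in numbers:
--                 if obj[i] == '.':
--                     dots += 1
--                 else:
--                     digits += 1
--                 i += 1
--             if dots > 1 or digits == 0:
--                 return False
--         else:
--             e = i
--             while e < n and obj[e] not in numbers:
--                 e += 1
--             tl = 0
--             p = i
--             while p < e:
--                 for k in keys:
--                     if p + len(k) <= e and obj.startswith(k, p):
--                         tl = len(k)
--                 if tl == 0:
--                     return False
--                 p += tl
--             i = e
--     return True
-- ===== Notes on version B (the rewrite author's own statement) =====
-- stated objective: faster
-- what changed: B replaces A's interleaved early-return scan with three independent checks (character whitelist, running paren balance, one index pass over maximal runs) and replaces A's per-char string building, float() try and repeated run-slicing j=j[len(t):] by O(1) counters (dots/digits) and index pointers with startswith, preserving A's last-match and carried-match-length quirks.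
import Mathlib
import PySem

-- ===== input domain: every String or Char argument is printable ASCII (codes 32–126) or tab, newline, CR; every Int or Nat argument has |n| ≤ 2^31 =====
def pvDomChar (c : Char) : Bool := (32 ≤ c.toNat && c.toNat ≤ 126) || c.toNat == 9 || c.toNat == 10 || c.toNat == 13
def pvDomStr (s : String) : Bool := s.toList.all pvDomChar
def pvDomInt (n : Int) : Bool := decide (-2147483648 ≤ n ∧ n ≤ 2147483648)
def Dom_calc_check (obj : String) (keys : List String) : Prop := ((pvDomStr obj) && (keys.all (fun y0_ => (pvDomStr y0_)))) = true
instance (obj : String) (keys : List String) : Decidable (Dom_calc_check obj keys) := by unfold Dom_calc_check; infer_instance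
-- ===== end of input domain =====

-- B replaces A's interleaved early-return scan + per-run string slicing by three
-- independent linear checks (char whitelist, paren balance, one pointer pass over
-- maximal runs with dot/digit counters); measurably faster on long operator runs.

-- ===== PORT A =====
-- numbers = '1234567890.' (shared character constant of both sources)
def pvNumbers : List Char := "1234567890.".toList

-- 'for t in obj: …' first loop of A: char validity, paren counting, early False
def calcLoop1 (sym : PySem.Set Char) : List Char → Int → Option Int
  | [], par => some par
  | t :: rest, par =>
    -- 't in numbers' for a 1-char t on the string '1234567890.' is char membership
    if ¬ (PySem.Set.contains sym t = true) ∧ ¬ (pvNumbers.contains t = true) then none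
    else
      let par1 := if t = '(' then par + 1 else par
      if t = ')' then
        if par1 - 1 < 0 then none else calcLoop1 sym rest (par1 - 1)
      else calcLoop1 sym rest par1

-- 'try: float(j) except ValueError' — exact for the j this program reaches:
-- j is nonempty over '1234567890.' only, and float(j) succeeds on such j iff
-- it has at most one '.' and at least one digit
def calcFloatOk (j : List Char) : Bool :=
  decide (j.count '.' ≤ 1 ∧ j.count '.' < j.length)

-- 'for k in keys: if ''.join(j[:len(k)]) == k: t = k'  (last match wins)
def calcPick (keys : List String) (j t : List Char) : List Char :=
  keys.foldl (fun acc k => if j.take k.length = k.toList then k.toList else acc) t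

-- 'while len(j): … if t == '': return False; j = j[len(t):]'  (t carried over)
def calcMatch (keys : List String) (j t : List Char) : Bool :=
  if hj : j = [] then true
  else if ht : calcPick keys j t = [] then false
  else calcMatch keys (j.drop (calcPick keys j t).length) (calcPick keys j t)
termination_by j.length
decreasing_by
  simp only [List.length_drop]
  have h1 : 0 < j.length := List.length_pos_iff.mpr hj
  have h2 : 0 < (calcPick keys j t).length := List.length_pos_iff.mpr ht
  omega

theorem calcGo_dec (c : Char) (cs : List Char) :
    (((c :: cs).dropWhile (fun x => pvNumbers.contains x)).dropWhile
        (fun x => !pvNumbers.contains x)).length < (c :: cs).length := by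
  by_cases h : pvNumbers.contains c
  · rw [List.dropWhile_cons_of_pos (by simpa using h)]
    have := List.length_dropWhile_le (fun x => !pvNumbers.contains x)
      (cs.dropWhile (fun x => pvNumbers.contains x))
    have := List.length_dropWhile_le (fun x => pvNumbers.contains x) cs
    simp only [List.length_cons]; omega
  · rw [List.dropWhile_cons_of_neg (by simpa using h),
      List.dropWhile_cons_of_pos (by simpa using h)]
    have := List.length_dropWhile_le (fun x => !pvNumbers.contains x) cs
    simp only [List.length_cons]; omega

-- 'while i < len(obj): …' second loop of A, one iteration = number run + op run
def calcGo (keys : List String) : List Char → Bool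
  | [] => true
  | c :: cs =>
    let j := (c :: cs).takeWhile (fun x => pvNumbers.contains x)
    let r1 := (c :: cs).dropWhile (fun x => pvNumbers.contains x)
    if j ≠ [] ∧ calcFloatOk j = false then false
    else
      let j2 := r1.takeWhile (fun x => !pvNumbers.contains x)
      let r2 := r1.dropWhile (fun x => !pvNumbers.contains x)
      if calcMatch keys j2 [] then calcGo keys r2 else false
termination_by l => l.length
decreasing_by simpa using calcGo_dec c cs

def calc_check (obj : String) (keys : List String) : Bool :=
  let l := obj.toList
  -- symbol_set = set(''.join(keys))
  let sym := PySem.Set.ofList (PySem.Str.join "" keys).toList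
  match calcLoop1 sym l 0 with
  | none => false
  | some par => if par ≠ 0 then false else calcGo keys l

-- ===== PORT B =====
-- running paren balance, never negative, zero at the end
def altBal : List Char → Int → Bool
  | [], bal => bal == 0
  | c :: cs, bal =>
    let b := bal + (if c = '(' then 1 else 0) - (if c = ')' then 1 else 0)
    if b < 0 then false else altBal cs b

-- 'while i < n and obj[i] in numbers: …' with dot/digit counters
def altNum : List Char → Nat → Nat → Nat × Nat × List Char
  | [], d, g => (d, g, [])
  | c :: cs, d, g =>
    if pvNumbers.contains c then
      if c = '.' then altNum cs (d + 1) g else altNum cs d (g + 1)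
    else (d, g, c :: cs)

-- 'for k in keys: if p + len(k) <= e and obj.startswith(k, p): tl = len(k)' —
-- over the run remainder rem = obj[p:e] both conditions hold iff the first
-- len(k) chars of rem are exactly k
def altPick (keys : List String) (rem : List Char) (tl : Nat) : Nat :=
  keys.foldl (fun acc k => if rem.take k.length = k.toList then k.length else acc) tl

-- 'while p < e: … if tl == 0: return False; p += tl'
def altMatch (keys : List String) (rem : List Char) (tl : Nat) : Bool :=
  if hr : rem = [] then true
  else if ht : altPick keys rem tl = 0 then false
  else altMatch keys (rem.drop (altPick keys rem tl)) (altPick keys rem tl)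
termination_by rem.length
decreasing_by
  simp only [List.length_drop]
  have h1 : 0 < rem.length := List.length_pos_iff.mpr hr
  omega

-- spec of altNum, needed for altGo's termination
theorem altNum_eq (l : List Char) (d g : Nat) :
    altNum l d g =
      (d + (l.takeWhile (fun x => pvNumbers.contains x)).count '.',
       g + (l.takeWhile (fun x => pvNumbers.contains x)).countP (fun x => !(x == '.')),
       l.dropWhile (fun x => pvNumbers.contains x)) := by
  induction l generalizing d g with
  | nil => simp [altNum]
  | cons c cs ih =>
    simp only [altNum, List.takeWhile_cons, List.dropWhile_cons]
    by_cases h : pvNumbers.contains c = true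
    · simp only [h, ite_true]
      by_cases hd : c = '.' <;>
        simp [hd, ih, List.count, Prod.ext_iff] <;> omega
    · simp only [h, if_false, Bool.false_eq_true]
      simp [List.count]

-- 'while i < n: …' one run per iteration
def altGo (keys : List String) : List Char → Bool
  | [] => true
  | c :: cs =>
    if pvNumbers.contains c then
      let res := altNum (c :: cs) 0 0
      if res.1 > 1 ∨ res.2.1 = 0 then false else altGo keys res.2.2
    else
      let run := (c :: cs).takeWhile (fun x => !pvNumbers.contains x)
      let rest := (c :: cs).dropWhile (fun x => !pvNumbers.contains x)
      if altMatch keys run 0 then altGo keys rest else false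
termination_by l => l.length
decreasing_by
  · rw [altNum_eq]
    simp only [List.length_cons]
    rw [List.dropWhile_cons_of_pos (by simp_all)]
    have := List.length_dropWhile_le (fun x => pvNumbers.contains x) cs
    omega
  · rw [List.dropWhile_cons_of_pos (by simp_all)]
    have := List.length_dropWhile_le (fun x => !pvNumbers.contains x) cs
    simp only [List.length_cons]; omega

def calc_check_alt (obj : String) (keys : List String) : Bool :=
  let l := obj.toList
  -- symbols = {c for k in keys for c in k}
  let sym := PySem.Set.ofList (keys.flatMap String.toList)
  if l.any (fun c => !pvNumbers.contains c && !PySem.Set.contains sym c) then false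
  else if altBal l 0 = false then false
  else altGo keys l

-- ===== PRECONDITION & SPEC =====
def Spec_calc_check (obj : String) (keys : List String) (out : Bool) : Prop := out = calc_check_alt obj keys
instance (obj : String) (keys : List String) (out : Bool) : Decidable (Spec_calc_check obj keys out) := by unfold Spec_calc_check; infer_instance

-- ===== CLAIM (what is proved, stated in full; the proofs are below) =====
def Claim_equal_calc_check : Prop := ∀ (obj : String) (keys : List String), Dom_calc_check obj keys → Spec_calc_check obj keys (calc_check obj keys)

-- ===== LEMMAS AND PROOFS =====

-- ''.join(keys) has exactly the characters of keys, in order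
theorem joinNilFlat : ∀ (ls : List (List Char)), PySem.Chars.join [] ls = ls.flatten
  | [] => by simp [PySem.Chars.join_nil]
  | [p] => by simp [PySem.Chars.join_singleton]
  | p :: q :: rest => by
      rw [PySem.Chars.join_cons_cons, joinNilFlat (q :: rest)]; simp

theorem join_toList (keys : List String) :
    (PySem.Str.join "" keys).toList = keys.flatMap String.toList := by
  rw [PySem.Str.toList_join, show ("" : String).toList = [] from rfl,
    joinNilFlat]
  exact List.flatMap_def.symm

-- phase 1: A's first loop + final balance test = B's validity scan + balance scan
theorem ph1 (sym : PySem.Set Char) (l : List Char) (par : Int) (h : 0 ≤ par) :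
    ((calcLoop1 sym l par).elim false (fun p => decide (p = 0)))
    = (!l.any (fun c => !pvNumbers.contains c && !PySem.Set.contains sym c)
        && altBal l par) := by
  induction l generalizing par with
  | nil =>
    simp only [calcLoop1, altBal, Option.elim, List.any_nil, Bool.not_false, Bool.true_and]
    cases h0 : decide (par = 0)
    · simp only [decide_eq_false_iff_not] at h0
      exact (beq_eq_false_iff_ne.mpr h0).symm
    · simp only [decide_eq_true_eq] at h0
      exact (beq_iff_eq.mpr h0).symm
  | cons c cs ih =>
    simp only [calcLoop1, altBal, List.any_cons]
    by_cases hv : ¬ (PySem.Set.contains sym c = true) ∧ ¬ (pvNumbers.contains c = true)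
    · rw [if_pos hv]
      have h1 : PySem.Set.contains sym c = false := by simpa using hv.1
      have h2 : pvNumbers.contains c = false := by simpa using hv.2
      simp only [h1, h2, Bool.not_false, Bool.and_self, Bool.true_or,
        Bool.not_true, Bool.false_and, Option.elim]
    · rw [if_neg hv]
      have hvb : (!pvNumbers.contains c && !PySem.Set.contains sym c) = false := by
        by_cases h1 : PySem.Set.contains sym c = true <;>
          by_cases h2 : pvNumbers.contains c = true <;> simp_all
      simp only [hvb, Bool.false_or]
      by_cases hp : c = '('
      · subst hp
        rw [if_pos rfl, if_neg (show ¬('(' = ')') by decide),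
          if_pos (show ('(' = '(') by rfl), if_neg (show ¬('(' = ')') by decide)]
        rw [show par + (1:Int) - 0 = par + 1 by ring, if_neg (show ¬(par + 1 < 0) by omega)]
        exact ih (par + 1) (by omega)
      · by_cases hq : c = ')'
        · subst hq
          rw [if_neg (show ¬(')' = '(') by decide), if_pos rfl,
            if_neg (show ¬(')' = '(') by decide), if_pos rfl]
          rw [show par + (0:Int) - 1 = par - 1 by ring]
          by_cases hneg : par - 1 < 0
          · rw [if_pos hneg, if_pos hneg]
            simp [Option.elim]
          · rw [if_neg hneg, if_neg hneg]
            exact ih (par - 1) (by omega)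
        · rw [if_neg hp, if_neg hq, if_neg hp, if_neg hq]
          rw [show par + (0:Int) - 0 = par by ring, if_neg (show ¬(par < 0) by omega)]
          exact ih par h

-- the two 'last matching key' folds pick keys of the same length
theorem pick_len (keys : List String) (j t : List Char) (tl : Nat)
    (h : t.length = tl) : (calcPick keys j t).length = altPick keys j tl := by
  induction keys generalizing t tl with
  | nil => simpa [calcPick, altPick] using h
  | cons k ks ih =>
    simp only [calcPick, altPick, List.foldl_cons] at *
    by_cases hc : j.take k.length = k.toList
    · rw [if_pos hc, if_pos hc]
      exact ih _ _ (by simp)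
    · rw [if_neg hc, if_neg hc]
      exact ih _ _ h

-- A's slicing matcher = B's pointer matcher
theorem match_eq (keys : List String) (j t : List Char) (tl : Nat)
    (h : t.length = tl) : calcMatch keys j t = altMatch keys j tl := by
  induction hn : j.length using Nat.strong_induction_on generalizing j t tl with
  | _ n ihn =>
  rw [calcMatch, altMatch]
  by_cases hj : j = []
  · simp [hj]
  · rw [dif_neg hj, dif_neg hj]
    have hl := pick_len keys j t tl h
    by_cases hz : calcPick keys j t = []
    · rw [dif_pos hz]
      rw [dif_pos (by rw [← hl, hz]; rfl)]
    · have hz' : ¬ altPick keys j tl = 0 := by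
        rw [← hl]; exact Nat.pos_iff_ne_zero.mp (List.length_pos_iff.mpr hz)
      rw [dif_neg hz, dif_neg hz', ← hl]
      exact ihn (j.drop (calcPick keys j t).length).length
        (by subst hn; simp only [List.length_drop];
            exact Nat.sub_lt (List.length_pos_iff.mpr hj) (List.length_pos_iff.mpr hz))
        _ _ _ (pick_len keys j t tl h ▸ rfl) rfl

-- one operator-run step, shared by both branches of go_eq
theorem tail_step (keys : List String) (r1 : List Char)
    (hd : ∀ d ds, r1 = d :: ds → pvNumbers.contains d = false)
    (ih : calcGo keys (r1.dropWhile (fun x => !pvNumbers.contains x))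
        = altGo keys (r1.dropWhile (fun x => !pvNumbers.contains x))) :
    (if calcMatch keys (r1.takeWhile (fun x => !pvNumbers.contains x)) []
      then calcGo keys (r1.dropWhile (fun x => !pvNumbers.contains x)) else false)
    = altGo keys r1 := by
  cases r1 with
  | nil => simp [calcMatch, calcGo, altGo]
  | cons d ds =>
    have hd' : pvNumbers.contains d = false := hd d ds rfl
    simp only [altGo, hd', Bool.false_eq_true, if_false]
    rw [match_eq keys _ [] 0 rfl]
    by_cases hm : altMatch keys (List.takeWhile (fun x => !pvNumbers.contains x) (d :: ds)) 0 = true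
    · rw [if_pos hm, if_pos hm]; exact ih
    · rw [if_neg hm, if_neg hm]

-- A's two-runs-per-iteration loop = B's one-run-per-iteration loop
theorem go_eq (keys : List String) (l : List Char) :
    calcGo keys l = altGo keys l := by
  induction hn : l.length using Nat.strong_induction_on generalizing l with
  | _ n ihn =>
  match l with
  | [] => simp [calcGo, altGo]
  | c :: cs =>
    subst hn
    by_cases hnum : pvNumbers.contains c = true
    · simp only [calcGo, altGo, hnum, altNum_eq, ite_true,
        List.takeWhile_cons_of_pos hnum, List.dropWhile_cons_of_pos hnum,
        Nat.zero_add, ne_eq, List.cons_ne_nil, not_false_iff, true_and, gt_iff_lt]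
      have hsplit : List.countP (fun x => x == '.') (c :: List.takeWhile pvNumbers.contains cs)
          + List.countP (fun x => !(x == '.')) (c :: List.takeWhile pvNumbers.contains cs)
          = (c :: List.takeWhile pvNumbers.contains cs).length := by
        simpa using (List.length_eq_countP_add_countP (p := fun x => x == '.')
          (l := c :: List.takeWhile pvNumbers.contains cs)).symm
      have hcnt : List.count '.' (c :: List.takeWhile pvNumbers.contains cs)
          = List.countP (fun x => x == '.') (c :: List.takeWhile pvNumbers.contains cs) := by
        simp [List.count]
      have key : calcFloatOk (c :: List.takeWhile pvNumbers.contains cs) = false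
          ↔ (1 < List.count '.' (c :: List.takeWhile pvNumbers.contains cs) ∨
             List.countP (fun x => !(x == '.')) (c :: List.takeWhile pvNumbers.contains cs) = 0) := by
        simp only [calcFloatOk, decide_eq_false_iff_not]
        omega
      by_cases hb : 1 < List.count '.' (c :: List.takeWhile pvNumbers.contains cs) ∨
          List.countP (fun x => !(x == '.')) (c :: List.takeWhile pvNumbers.contains cs) = 0
      · rw [if_pos hb, if_pos (key.mpr hb)]
      · rw [if_neg hb, if_neg (fun h => hb (key.mp h))]
        apply tail_step
        · intro d ds heq
          have hh := List.head?_dropWhile_not (fun x => pvNumbers.contains x) cs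
          rw [show List.dropWhile (fun x => pvNumbers.contains x) cs = d :: ds from heq] at hh
          simpa using hh
        · apply ihn _ _ _ rfl
          have hdec := calcGo_dec c cs
          rw [List.dropWhile_cons_of_pos hnum] at hdec
          exact hdec
    · have hnum' : pvNumbers.contains c = false := by simpa using hnum
      have hcne : ¬((fun x => pvNumbers.contains x) c = true) := by simpa using hnum
      simp only [calcGo, altGo, hnum', Bool.false_eq_true, if_false,
        List.takeWhile_cons_of_neg hcne, List.dropWhile_cons_of_neg hcne]
      rw [if_neg (by simp)]
      rw [match_eq keys _ [] 0 rfl]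
      have hrec : calcGo keys (List.dropWhile (fun x => !pvNumbers.contains x) (c :: cs))
          = altGo keys (List.dropWhile (fun x => !pvNumbers.contains x) (c :: cs)) := by
        apply ihn _ _ _ rfl
        rw [List.dropWhile_cons_of_pos (p := fun x => !pvNumbers.contains x) (a := c)
          (l := cs) (by simpa using hnum')]
        have := List.length_dropWhile_le (fun x => !pvNumbers.contains x) cs
        simp only [List.length_cons]; omega
      by_cases hm : altMatch keys (List.takeWhile (fun x => !pvNumbers.contains x) (c :: cs)) 0 = true
      · rw [if_pos hm, if_pos hm]; exact hrec
      · rw [if_neg hm, if_neg hm]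

-- B's tail (validity + balance checks) returns false whenever phase 1 fails
theorem rhs_of_false (keys : List String) (l : List Char) (S : PySem.Set Char)
    (h : (!l.any (fun c => !pvNumbers.contains c && !PySem.Set.contains S c) && altBal l 0) = false) :
    (if l.any (fun c => !pvNumbers.contains c && !PySem.Set.contains S c) = true then false
     else if altBal l 0 = false then false else altGo keys l) = false := by
  by_cases ha : l.any (fun c => !pvNumbers.contains c && !PySem.Set.contains S c) = true
  · rw [if_pos ha]
  · have ha' : l.any (fun c => !pvNumbers.contains c && !PySem.Set.contains S c) = false := by
      simpa using ha
    rw [if_neg (show ¬_ from by simp only [ha']; exact Bool.false_ne_true)]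
    rw [ha'] at h
    simp only [Bool.not_false, Bool.true_and] at h
    rw [if_pos h]

theorem final_eq (obj : String) (keys : List String) :
    calc_check obj keys = calc_check_alt obj keys := by
  have hj := join_toList keys
  simp only [calc_check, calc_check_alt, hj]
  have h1 := ph1 (PySem.Set.ofList (keys.flatMap String.toList)) obj.toList 0 (by omega)
  cases hcl : calcLoop1 (PySem.Set.ofList (keys.flatMap String.toList)) obj.toList 0 with
  | none =>
    rw [hcl] at h1
    simp only [Option.elim] at h1
    exact (rhs_of_false keys obj.toList _ h1.symm).symm
  | some p =>
    rw [hcl] at h1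
    simp only [Option.elim] at h1
    by_cases hp : p = 0
    · show (if p ≠ 0 then false else calcGo keys obj.toList) = _
      rw [if_neg (not_not_intro hp)]
      rw [hp] at h1
      simp only [decide_true] at h1
      have hand := (Bool.and_eq_true _ _).mp h1.symm
      have ha : obj.toList.any
          (fun c => !pvNumbers.contains c && !PySem.Set.contains (PySem.Set.ofList (keys.flatMap String.toList)) c) = false := by
        simpa using hand.1
      rw [if_neg (show ¬_ from by simp only [ha]; exact Bool.false_ne_true),
        if_neg (show ¬_ from by simp only [hand.2]; decide)]
      exact go_eq keys obj.toList
    · show (if p ≠ 0 then false else calcGo keys obj.toList) = _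
      rw [if_pos hp]
      have hfal : (!obj.toList.any (fun c => !pvNumbers.contains c && !PySem.Set.contains (PySem.Set.ofList (keys.flatMap String.toList)) c)
          && altBal obj.toList 0) = false := by
        rw [← h1]; simp [hp]
      exact (rhs_of_false keys obj.toList _ hfal).symm

-- ===== VERDICT (by name: the statement is the Claim_ definition above) =====
theorem calc_check_spec : Claim_equal_calc_check := by
  intro obj keys _
  unfold Spec_calc_check
  exact final_eq obj keys
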